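-- pv_equiv track=rewrite | github.com/LeGAT45/corekeeper_midi_to_instrument | midi_extraction_to_ahk_file.py | transpose_note
-- ===== SOURCE A (Python) =====
-- def transpose_note(note, midi_to_key):
--     """Transpose note to nearest playable note, preserving pitch class"""
--     playable_notes = sorted(midi_to_key.keys())
--     if note in playable_notes:
--         return note
--
--     # Get pitch class (C, C#, D, etc.)
--     pitch_class = note % 12
--     # Find all matching pitch classes in playable range
--     candidates = [n for n in playable_notes if n % 12 == pitch_class]
--
--     if candidates:
--         # Find closest octave match
--         closest = min(candidates, key=lambda x: abs(x - note))
--         return closest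
--     else:
--         # Fallback to nearest note if exact pitch class unavailable
--         closest = min(playable_notes, key=lambda x: abs(x - note))
--         return closest
-- ===== SOURCE B (Python) =====
-- def transpose_note(note, midi_to_key):
--     """Transpose note to nearest playable note, preserving pitch class.
--
--     Binary search instead of min-scans: sort the keys, keep those of the same
--     pitch class if any exist (else all keys), then locate `note`'s insertion
--     point in that sorted pool by bisection and compare only the two
--     neighbouring notes; on a distance tie the lower note wins, and a pool
--     containing `note` itself yields `note` (distance 0), so no membership
--     pre-check is needed.
--     """
--     keys = sorted(midi_to_key.keys())
--     same = [n for n in keys if n % 12 == note % 12]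
--     pool = same if same else keys
--     # bisect_left(pool, note), written out since this module imports nothing
--     lo, hi = 0, len(pool)
--     while lo < hi:
--         mid = (lo + hi) // 2
--         if pool[mid] < note:
--             lo = mid + 1
--         else:
--             hi = mid
--     if lo == 0:
--         return pool[0]
--     if lo == len(pool):
--         return pool[-1]
--     left, right = pool[lo - 1], pool[lo]
--     return left if note - left <= right - note else right
-- ===== Notes on version B (the rewrite author's own statement) =====
-- stated objective: alternative
-- what changed: Replaces A's membership pre-check, candidate comprehension and two linear min(..., key=abs) scans by a bisect_left binary search on the sorted pool (same-pitch-class keys if any, else all keys) followed by a comparison of only the two neighbouring notes; the strict order of the pool makes the lower neighbour win ties exactly as min does.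
import Mathlib
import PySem

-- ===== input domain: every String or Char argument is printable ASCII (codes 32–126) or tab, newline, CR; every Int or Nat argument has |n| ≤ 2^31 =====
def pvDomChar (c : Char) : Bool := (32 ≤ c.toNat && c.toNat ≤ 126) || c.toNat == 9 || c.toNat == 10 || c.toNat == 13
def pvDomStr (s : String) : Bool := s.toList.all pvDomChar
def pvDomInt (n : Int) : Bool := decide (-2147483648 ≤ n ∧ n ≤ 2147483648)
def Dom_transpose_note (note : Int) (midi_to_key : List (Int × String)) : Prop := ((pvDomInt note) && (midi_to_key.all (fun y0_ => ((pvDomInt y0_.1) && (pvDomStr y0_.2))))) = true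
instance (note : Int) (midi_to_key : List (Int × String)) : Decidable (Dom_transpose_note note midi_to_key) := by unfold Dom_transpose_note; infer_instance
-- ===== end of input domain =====

-- B replaces A's membership pre-check and its two linear min(..., key=abs) scans by a
-- binary search (bisect_left) on the sorted candidate pool plus a two-neighbour comparison
-- (objective: alternative).


-- ===== PORT A =====
-- sorted(midi_to_key.keys()) — shared by both ports (both Pythons compute it verbatim)
def tnKeys (midi_to_key : List (Int × String)) : List Int :=
  PySem.List.sorted ((PySem.Dict.ofList midi_to_key).keys) (fun x => x) false

-- [n for n in keys if n % 12 == note % 12] — A's `candidates`, B's `same` (verbatim in both)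
def tnSame (note : Int) (midi_to_key : List (Int × String)) : List Int :=
  (tnKeys midi_to_key).filter (fun n => PySem.Int.mod n 12 == PySem.Int.mod note 12)

def transpose_note (note : Int) (midi_to_key : List (Int × String)) : Int :=
  let playable_notes := tnKeys midi_to_key
  if note ∈ playable_notes then note
  else
    match PySem.List.min? (tnSame note midi_to_key) (fun x => |x - note|) with
    | some closest => closest
    | none =>
      -- candidates empty: fall back to nearest note of any pitch class
      match PySem.List.min? playable_notes (fun x => |x - note|) with
      | some closest => closest
      | none => 0  -- min([]) raises ValueError in Python: excluded by Pre_

-- ===== PORT B =====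
def transpose_note_alt (note : Int) (midi_to_key : List (Int × String)) : Int :=
  let same := tnSame note midi_to_key
  let pool := if same = [] then tnKeys midi_to_key else same
  -- Source B's hand-written while-loop IS Python's bisect_left; PySem.List.bisectLeft is that
  -- exact loop (mid = (lo+hi)//2, pool[mid] < note → lo := mid+1, else hi := mid)
  let lo := PySem.List.bisectLeft pool note
  if lo = 0 then (PySem.List.pyGet? pool 0).getD 0          -- pool[0]; IndexError on empty pool excluded by Pre_
  else if lo = pool.length then (PySem.List.pyGet? pool (-1)).getD 0   -- pool[-1]
  else
    let left := (PySem.List.pyGet? pool ((lo : Int) - 1)).getD 0   -- pool[lo-1], in range here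
    let right := (PySem.List.pyGet? pool (lo : Int)).getD 0        -- pool[lo], in range here
    if note - left ≤ right - note then left else right

-- ===== PRECONDITION & SPEC =====
-- Pre_ excludes the empty dict, on which Python A raises ValueError (min of an empty
-- sequence) and Python B raises IndexError.
def Pre_transpose_note (note : Int) (midi_to_key : List (Int × String)) : Prop := midi_to_key ≠ []
instance (note : Int) (midi_to_key : List (Int × String)) : Decidable (Pre_transpose_note note midi_to_key) := by unfold Pre_transpose_note; infer_instance
def pvWitness_transpose_note : Int × (List (Int × String)) := (61, [(60, "Q"), (48, "W")])
def Spec_transpose_note (note : Int) (midi_to_key : List (Int × String)) (out : Int) : Prop := out = transpose_note_alt note midi_to_key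
instance (note : Int) (midi_to_key : List (Int × String)) (out : Int) : Decidable (Spec_transpose_note note midi_to_key out) := by unfold Spec_transpose_note; infer_instance

-- ===== CLAIM (what is proved, stated in full; the proofs are below) =====
def Claim_equal_transpose_note : Prop := ∀ (note : Int) (midi_to_key : List (Int × String)), Dom_transpose_note note midi_to_key → Pre_transpose_note note midi_to_key → Spec_transpose_note note midi_to_key (transpose_note note midi_to_key)

-- ===== LEMMAS AND PROOFS =====

-- the step of min(..., key=lambda x: abs(x - note)) as a fold
def tnMStep (note : Int) (acc : Option Int) (x : Int) : Option Int :=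
  match acc with
  | none => some x
  | some m => if |x - note| < |m - note| then some x else some m

theorem tnMin?_eq_fold (note : Int) (l : List Int) :
    PySem.List.min? l (fun x => |x - note|) = List.foldl (tnMStep note) none l := by
  unfold PySem.List.min?
  congr 1
  funext acc x
  cases acc <;> rfl

-- if the accumulator is already (weakly) nearest, the fold keeps it
theorem tnFold_keep (note m : Int) (l : List Int)
    (h : ∀ x ∈ l, |m - note| ≤ |x - note|) :
    List.foldl (tnMStep note) (some m) l = some m := by
  induction l with
  | nil => rfl
  | cons a t ih =>
    have ha : ¬ (|a - note| < |m - note|) := not_lt.mpr (h a (by simp))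
    simp only [List.foldl_cons, tnMStep, if_neg ha]
    exact ih (fun x hx => h x (by simp [hx]))

-- over a strictly ascending run entirely below `note` the fold walks to the last element
theorem tnFold_decr (note : Int) (l : List Int) :
    ∀ m, l.Pairwise (· < ·) → (∀ x ∈ l, x < note) → m < note → (∀ x ∈ l, m < x) →
      List.foldl (tnMStep note) (some m) l = some (l.getLastD m) := by
  induction l with
  | nil => intro m _ _ _ _; rfl
  | cons a t ih =>
    intro m hp hlt hm hma
    obtain ⟨h1, h2⟩ := List.pairwise_cons.mp hp
    have ham : m < a := hma a (by simp)
    have halt : a < note := hlt a (by simp)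
    have hcl : |a - note| < |m - note| := by
      rw [abs_sub_comm a, abs_sub_comm m, abs_of_nonneg (by omega), abs_of_nonneg (by omega)]
      omega
    simp only [List.foldl_cons, tnMStep, if_pos hcl, List.getLastD_cons]
    exact ih a h2 (fun x hx => hlt x (by simp [hx])) halt h1

-- over a strictly ascending run entirely at or above `note` only the head can improve
theorem tnFold_suffix (note m : Int) (l : List Int)
    (hp : l.Pairwise (· < ·)) (hge : ∀ x ∈ l, note ≤ x) :
    List.foldl (tnMStep note) (some m) l =
      some (match l with | [] => m | b :: _ => if |b - note| < |m - note| then b else m) := by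
  cases l with
  | nil => rfl
  | cons b t =>
    obtain ⟨h1, h2⟩ := List.pairwise_cons.mp hp
    have hb : note ≤ b := hge b (by simp)
    have hkey : ∀ x ∈ t, |b - note| ≤ |x - note| := by
      intro x hx
      have hbx := h1 x hx
      have hx' := hge x (by simp [hx])
      rw [abs_of_nonneg (by omega), abs_of_nonneg (by omega)]
      omega
    simp only [List.foldl_cons, tnMStep]
    split_ifs with hc
    · exact tnFold_keep note b t hkey
    · exact tnFold_keep note m t (fun x hx => le_trans (not_lt.mp hc) (hkey x hx))

theorem tnGetLastD_eq_getD (l : List Int) (d : Int) (h : l ≠ []) :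
    l.getLastD d = l.getD (l.length - 1) 0 := by
  induction l generalizing d with
  | nil => exact absurd rfl h
  | cons a t ih =>
    rw [List.getLastD_cons]
    cases t with
    | nil => rfl
    | cons b u =>
      rw [ih a (by simp)]
      rfl

-- min with key abs(x - note) on a strictly sorted nonempty list is decided at the
-- bisect_left boundary: the element just below it or just at it, lower note on a tie
theorem tnMin?_bisect (note : Int) (l : List Int)
    (hp : l.Pairwise (· < ·)) (hne : l ≠ []) :
    PySem.List.min? l (fun x => |x - note|) =
      some (if PySem.List.bisectLeft l note = 0 then l.getD 0 0
            else if PySem.List.bisectLeft l note = l.length then l.getD (l.length - 1) 0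
            else if note - l.getD (PySem.List.bisectLeft l note - 1) 0 ≤
                    l.getD (PySem.List.bisectLeft l note) 0 - note
                 then l.getD (PySem.List.bisectLeft l note - 1) 0
                 else l.getD (PySem.List.bisectLeft l note) 0) := by
  obtain ⟨hle, hlow, hhigh⟩ := PySem.List.bisectLeft_spec l note (hp.imp le_of_lt)
  set i := PySem.List.bisectLeft l note with hidef
  clear_value i
  rw [tnMin?_eq_fold]
  have hsplit : l = l.take i ++ l.drop i := (List.take_append_drop i l).symm
  have hpt : (l.take i).Pairwise (· < ·) := hp.sublist (List.take_sublist i l)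
  have hpd : (l.drop i).Pairwise (· < ·) := hp.sublist (List.drop_sublist i l)
  have hlen0 : 0 < l.length := List.length_pos_of_ne_nil hne
  have htlt : ∀ x ∈ l.take i, x < note := by
    intro x hx
    obtain ⟨j, hj, hxe⟩ := List.mem_iff_getElem.mp hx
    have hj2 : j < i ∧ j < l.length := by simp at hj; omega
    subst hxe
    rw [List.getElem_take]
    exact hlow j hj2.2 hj2.1
  have hdge : ∀ x ∈ l.drop i, note ≤ x := by
    intro x hx
    obtain ⟨j, hj, hxe⟩ := List.mem_iff_getElem.mp hx
    subst hxe
    rw [List.getElem_drop]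
    exact hhigh (i + j) (by simp at hj; omega) (Nat.le_add_right i j)
  conv_lhs => rw [hsplit]
  rw [List.foldl_append]
  by_cases h0 : i = 0
  · -- all elements ≥ note: the head is nearest
    rw [if_pos h0]
    subst h0
    simp only [List.take_zero, List.foldl_nil, List.drop_zero] at *
    obtain ⟨a, t, rfl⟩ := List.exists_cons_of_ne_nil hne
    have hstep : List.foldl (tnMStep note) none (a :: t) = List.foldl (tnMStep note) (some a) t := rfl
    rw [hstep]
    obtain ⟨h1, h2⟩ := List.pairwise_cons.mp hp
    have ha : note ≤ a := hdge a (by simp)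
    rw [tnFold_keep note a t (by
      intro x hx
      have := h1 x hx
      have := hdge x (by simp [hx])
      rw [abs_of_nonneg (by omega), abs_of_nonneg (by omega)]
      omega)]
    rfl
  · by_cases hL : i = l.length
    · -- all elements < note: the last is nearest
      rw [if_neg h0, if_pos hL]
      subst hL
      simp only [List.take_length, List.drop_length, List.foldl_nil]
      obtain ⟨a, t, rfl⟩ := List.exists_cons_of_ne_nil hne
      have hstep : List.foldl (tnMStep note) none (a :: t) = List.foldl (tnMStep note) (some a) t := rfl
      rw [hstep]
      obtain ⟨h1, h2⟩ := List.pairwise_cons.mp hp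
      have hlt' : ∀ x ∈ (a :: t), x < note := by
        intro x hx
        exact htlt x (by simpa using hx)
      rw [tnFold_decr note t a h2 (fun x hx => hlt' x (by simp [hx])) (hlt' a (by simp)) h1]
      cases t with
      | nil => rfl
      | cons b u =>
        rw [tnGetLastD_eq_getD (b :: u) a (by simp)]
        rfl
    · -- boundary inside: compare l[i-1] and l[i]
      rw [if_neg h0, if_neg hL]
      have hilen : i < l.length := lt_of_le_of_ne hle hL
      have h0' : 0 < i := Nat.pos_of_ne_zero h0
      have htne : l.take i ≠ [] := by
        intro h
        rcases List.take_eq_nil_iff.mp h with h' | h'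
        · exact h0 h'
        · rw [h'] at hilen
          simp at hilen
      -- the left fold lands on l[i-1]
      obtain ⟨a, t, hat⟩ := List.exists_cons_of_ne_nil htne
      have hstep : List.foldl (tnMStep note) none (l.take i) = List.foldl (tnMStep note) (some a) t := by
        rw [hat]; rfl
      obtain ⟨h1, h2⟩ := List.pairwise_cons.mp (hat ▸ hpt)
      have htlt' : ∀ x ∈ (a :: t), x < note := fun x hx => htlt x (hat ▸ hx)
      rw [hstep, tnFold_decr note t a h2 (fun x hx => htlt' x (by simp [hx])) (htlt' a (by simp)) h1]
      have hlast : t.getLastD a = l.getD (i - 1) 0 := by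
        have hlen_take : (l.take i).length = i := by simp; omega
        have h1' : (l.take i).getLastD 0 = (l.take i).getD ((l.take i).length - 1) 0 :=
          tnGetLastD_eq_getD (l.take i) 0 htne
        have h2' : (l.take i).getLastD 0 = t.getLastD a := by rw [hat, List.getLastD_cons]
        rw [← h2', h1', hlen_take]
        rw [List.getD_eq_getElem _ _ (by simp; omega), List.getD_eq_getElem _ _ (by omega)]
        exact List.getElem_take
      rw [hlast]
      -- the right fold compares against l[i]
      have hdcons : l.drop i = l[i] :: l.drop (i + 1) := by
        rw [List.drop_eq_getElem_cons hilen]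
      rw [hdcons]
      have hpd' := hdcons ▸ hpd
      rw [tnFold_suffix note (l.getD (i - 1) 0) _ hpd' (by
        intro x hx
        exact hdge x (hdcons ▸ hx))]
      have hgetd : l.getD i 0 = l[i] := List.getD_eq_getElem l 0 hilen
      have hleft_lt : l.getD (i - 1) 0 < note := by
        rw [List.getD_eq_getElem l 0 (by omega)]
        exact hlow (i - 1) (by omega) (by omega)
      have hright_ge : note ≤ l[i] := hhigh i hilen (le_refl i)
      simp only [hgetd]
      congr 1
      rw [abs_of_nonneg (by omega), abs_of_nonpos (by omega)]
      by_cases hc : note - l.getD (i - 1) 0 ≤ l[i] - note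
      · rw [if_pos hc, if_neg (by omega)]
      · rw [if_neg hc, if_pos (by omega)]

-- if note itself is playable, min over its pitch-class candidates is note
theorem tnMin?_self (note : Int) (l : List Int) (h : note ∈ l) :
    PySem.List.min? (l.filter (fun n => PySem.Int.mod n 12 == PySem.Int.mod note 12))
      (fun x => |x - note|) = some note := by
  have hmem : note ∈ l.filter (fun n => PySem.Int.mod n 12 == PySem.Int.mod note 12) := by
    simp [List.mem_filter, h]
  have hne : l.filter (fun n => PySem.Int.mod n 12 == PySem.Int.mod note 12) ≠ [] :=
    List.ne_nil_of_mem hmem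
  cases hmin : PySem.List.min? (l.filter (fun n => PySem.Int.mod n 12 == PySem.Int.mod note 12))
      (fun x => |x - note|) with
  | none => exact absurd ((PySem.List.min?_eq_none_iff _ _).mp hmin) hne
  | some m =>
    have hle := PySem.List.min?_isMin hmin note hmem
    have hle0 : |m - note| ≤ 0 := by simpa using hle
    have h0 : m - note = 0 := abs_eq_zero.mp (le_antisymm hle0 (abs_nonneg _))
    have hmn : m = note := by omega
    simp [hmn]

-- pyGet? bridges for the three in-range index shapes B uses
theorem tnPyGet_zero (l : List Int) (h : l ≠ []) :
    (PySem.List.pyGet? l 0).getD 0 = l.getD 0 0 := by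
  have hlen : 0 < l.length := List.length_pos_of_ne_nil h
  simp [PySem.List.pyGet?, PySem.List.pyIdx?, hlen]

theorem tnPyGet_neg_one (l : List Int) (h : l ≠ []) :
    (PySem.List.pyGet? l (-1)).getD 0 = l.getD (l.length - 1) 0 := by
  have hlen : 0 < l.length := List.length_pos_of_ne_nil h
  have hidx : PySem.List.pyIdx? l.length (-1) = some (l.length - 1) := by
    simp [PySem.List.pyIdx?]
    omega
  have hlt : l.length - 1 < l.length := by omega
  simp [PySem.List.pyGet?, hidx, List.getElem?_eq_getElem hlt]

theorem tnPyGet_nat (l : List Int) (k : Nat) (h : k < l.length) :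
    (PySem.List.pyGet? l (k : Int)).getD 0 = l.getD k 0 := by
  have hidx : PySem.List.pyIdx? l.length (k : Int) = some k := by
    simp [PySem.List.pyIdx?]
    omega
  simp [PySem.List.pyGet?, hidx, List.getElem?_eq_getElem h]

-- B's body equals the bisect-boundary expression of tnMin?_bisect
theorem tnAlt_eq (note : Int) (midi_to_key : List (Int × String))
    (pool : List Int) (hpool : pool = (if tnSame note midi_to_key = [] then tnKeys midi_to_key else tnSame note midi_to_key))
    (hps : pool.Pairwise (· ≤ ·)) (hne : pool ≠ []) :
    transpose_note_alt note midi_to_key =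
      (if PySem.List.bisectLeft pool note = 0 then pool.getD 0 0
       else if PySem.List.bisectLeft pool note = pool.length then pool.getD (pool.length - 1) 0
       else if note - pool.getD (PySem.List.bisectLeft pool note - 1) 0 ≤
               pool.getD (PySem.List.bisectLeft pool note) 0 - note
            then pool.getD (PySem.List.bisectLeft pool note - 1) 0
            else pool.getD (PySem.List.bisectLeft pool note) 0) := by
  simp only [transpose_note_alt]
  rw [← hpool]
  obtain ⟨hle, hlow, hhigh⟩ := PySem.List.bisectLeft_spec pool note hps
  set i := PySem.List.bisectLeft pool note with hidef
  clear_value i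
  by_cases h0 : i = 0
  · simp only [if_pos h0, tnPyGet_zero pool hne]
  · by_cases hL : i = pool.length
    · simp only [if_neg h0, if_pos hL, tnPyGet_neg_one pool hne]
    · have hilen : i < pool.length := by
        have := PySem.List.bisectLeft_spec pool note
        omega
      have h0' : 0 < i := Nat.pos_of_ne_zero h0
      have hcast1 : ((i : Int) - 1) = ((i - 1 : Nat) : Int) := by omega
      simp only [if_neg h0, if_neg hL, hcast1, tnPyGet_nat pool (i - 1) (by omega),
        tnPyGet_nat pool i hilen]

-- ===== VERDICT (by name: the statement is the Claim_ definition above) =====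
theorem transpose_note_spec : Claim_equal_transpose_note := by
  intro note midi_to_key _ hpre
  unfold Spec_transpose_note
  -- the shared sorted key list is nonempty and strictly ascending
  have hknodup : (tnKeys midi_to_key).Nodup := by
    unfold tnKeys
    exact ((PySem.List.sorted_perm _ _ _).nodup_iff).mpr (PySem.Dict.nodup_keys_ofList midi_to_key)
  have hkle : (tnKeys midi_to_key).Pairwise (· ≤ ·) := by
    unfold tnKeys
    exact PySem.List.sorted_pairwise _ _
  have hkp : (tnKeys midi_to_key).Pairwise (· < ·) :=
    (hkle.and hknodup).imp (fun h => lt_of_le_of_ne h.1 h.2)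
  have hkne : tnKeys midi_to_key ≠ [] := by
    unfold tnKeys
    rw [Ne, PySem.List.sorted_eq_nil_iff]
    intro hk
    obtain ⟨p, ps, rfl⟩ := List.exists_cons_of_ne_nil hpre
    have : p.1 ∈ (PySem.Dict.ofList (p :: ps)).keys := by
      have := PySem.Dict.keys_foldl_insert_key (ν := String) (p :: ps) Prod.fst (fun _ x => x.2) PySem.Dict.empty
      unfold PySem.Dict.ofList PySem.Dict.update
      rw [this]
      rw [PySem.Set.mem_update]
      simp
    rw [hk] at this
    exact absurd this (List.not_mem_nil)
  set pool := (if tnSame note midi_to_key = [] then tnKeys midi_to_key else tnSame note midi_to_key) with hpooldef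
  have hpp : pool.Pairwise (· < ·) := by
    rw [hpooldef]
    split
    · exact hkp
    · exact hkp.sublist List.filter_sublist
  have hpoolne : pool ≠ [] := by
    rw [hpooldef]
    split
    · exact hkne
    · assumption
  have hmin := tnMin?_bisect note pool hpp hpoolne
  have halt := tnAlt_eq note midi_to_key pool hpooldef (hpp.imp le_of_lt) hpoolne
  rw [← halt] at hmin
  -- A's value is the min over pool too
  unfold transpose_note
  by_cases hmem : note ∈ tnKeys midi_to_key
  · rw [if_pos hmem]
    have hsne : tnSame note midi_to_key ≠ [] := by
      unfold tnSame
      apply List.ne_nil_of_mem (a := note)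
      simp [List.mem_filter, hmem]
    have hpool_same : pool = tnSame note midi_to_key := by
      rw [hpooldef, if_neg hsne]
    have hself : PySem.List.min? pool (fun x => |x - note|) = some note := by
      rw [hpool_same]
      exact tnMin?_self note (tnKeys midi_to_key) hmem
    rw [hself] at hmin
    exact (Option.some_injective _ hmin)
  · rw [if_neg hmem]
    by_cases hsne : tnSame note midi_to_key = []
    · have hpool_keys : pool = tnKeys midi_to_key := by rw [hpooldef, if_pos hsne]
      rw [hpool_keys] at hmin
      rw [hsne]
      have hnone : PySem.List.min? ([] : List Int) (fun x => |x - note|) = none := by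
        rw [PySem.List.min?_eq_none_iff]
      rw [hnone, hmin]
    · have hpool_same : pool = tnSame note midi_to_key := by rw [hpooldef, if_neg hsne]
      rw [hpool_same] at hmin
      rw [hmin]
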